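-- pv_equiv track=rewrite | github.com/GitMonsters/Prime-directive | Prime-directive/physics_multilingual.py | translate_prompt
-- ===== SOURCE A (Python) =====
-- def translate_prompt(prompt: str, target_language: str) -> str:
--     """
--     Translate question to target language (basic implementation).
--     For production, integrate with CLARIN translation services.
--     """
--     # Basic keyword mapping - in production, use CLARIN API
--     translations = {
--         'de': {
--             'what is': 'Was ist',
--             'explain': 'Erkläre',
--             'how does': 'Wie funktioniert',
--             'gravity': 'Gravitation',
--             'entropy': 'Entropie',
--             'quantum': 'Quanten',
--         },
--         'fr': {
--             'what is': "Qu'est-ce que",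
--             'explain': 'Expliquez',
--             'how does': 'Comment fonctionne',
--             'gravity': 'gravité',
--             'entropy': 'entropie',
--             'quantum': 'quantique',
--         },
--         'es': {
--             'what is': 'Qué es',
--             'explain': 'Explica',
--             'how does': 'Cómo funciona',
--             'gravity': 'gravedad',
--             'entropy': 'entropía',
--             'quantum': 'cuántico',
--         },
--     }
--
--     if target_language not in translations:
--         return prompt
--
--     translated = prompt.lower()
--     for en_word, target_word in translations[target_language].items():
--         translated = translated.replace(en_word, target_word)
--
--     return translated
-- ===== SOURCE B (Python) =====
-- def translate_prompt(prompt: str, target_language: str) -> str: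
--     """
--     Translate question to target language (basic implementation).
--     Row-oriented table (one row per English keyword, one column per
--     language); single left-to-right scan: at each position substitute
--     the first matching keyword, otherwise copy the character.
--     """
--     ROWS = [
--         ("what is", "Was ist", "Qu'est-ce que", "Qué es"),
--         ("explain", "Erkläre", "Expliquez", "Explica"),
--         ("how does", "Wie funktioniert", "Comment fonctionne", "Cómo funciona"),
--         ("gravity", "Gravitation", "gravité", "gravedad"),
--         ("entropy", "Entropie", "entropie", "entropía"),
--         ("quantum", "Quanten", "quantique", "cuántico"),
--     ]
--     LANGS = ["de", "fr", "es"]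
--     if target_language not in LANGS:
--         return prompt
--     col = LANGS.index(target_language) + 1
--     pairs = [(row[0], row[col]) for row in ROWS]
--
--     s = prompt.lower()
--     out = []
--     i = 0
--     n = len(s)
--     while i < n:
--         for en_word, target_word in pairs:
--             if s.startswith(en_word, i):
--                 out.append(target_word)
--                 i += len(en_word)
--                 break
--         else:
--             out.append(s[i])
--             i += 1
--     return "".join(out)
-- ===== Notes on version B (the rewrite author's own statement) =====
-- stated objective: alternative
-- what changed: Replaces the dict-of-dicts plus six sequential full-string .replace passes by a row-oriented keyword table with a language column index and one left-to-right scan that substitutes the first matching keyword at each position.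
-- intended difference: On prompts where an earlier substitution's trailing letter abuts following text that completes a later keyword (lowered prompt contains 'explainntropy' for de, or 'what isxplain'/'what isntropy'/'how doesntropy' for fr), A's sequential passes translate a keyword the user never wrote (e.g. A('explainntropy','de')='ErklärEntropie'), while B's single scan leaves the trailing text untouched ('Erklärentropy'), which is the intended behaviour of keyword translation. — e.g. on translate_prompt("explainntropy", "de"): A returns "ErklärEntropie", B returns "Erklärentropy"
import Mathlib
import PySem

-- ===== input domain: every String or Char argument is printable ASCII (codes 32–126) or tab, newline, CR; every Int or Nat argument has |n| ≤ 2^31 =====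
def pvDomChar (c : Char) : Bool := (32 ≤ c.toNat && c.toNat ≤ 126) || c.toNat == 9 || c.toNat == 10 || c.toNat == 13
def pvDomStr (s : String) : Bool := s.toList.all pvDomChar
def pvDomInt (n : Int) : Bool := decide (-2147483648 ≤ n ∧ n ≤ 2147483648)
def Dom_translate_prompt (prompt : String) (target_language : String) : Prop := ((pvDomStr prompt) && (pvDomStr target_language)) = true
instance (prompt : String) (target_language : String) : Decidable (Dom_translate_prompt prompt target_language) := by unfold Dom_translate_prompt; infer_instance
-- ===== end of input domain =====

-- B replaces A's dict-of-dicts and its six sequential full-string replace passes by a row-oriented keyword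
-- table (language chosen by column index) and one left-to-right scan; on the four cascade trigger substrings
-- A translates a keyword the user never wrote, B (intendedly) does not (see D_ below).
-- ===== PORT A =====
def pvTransA : PySem.Dict String (PySem.Dict String String) :=
  PySem.Dict.ofList [
    ("de", PySem.Dict.ofList [("what is", "Was ist"), ("explain", "Erkläre"), ("how does", "Wie funktioniert"), ("gravity", "Gravitation"), ("entropy", "Entropie"), ("quantum", "Quanten")]),
    ("fr", PySem.Dict.ofList [("what is", "Qu'est-ce que"), ("explain", "Expliquez"), ("how does", "Comment fonctionne"), ("gravity", "gravité"), ("entropy", "entropie"), ("quantum", "quantique")]),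
    ("es", PySem.Dict.ofList [("what is", "Qué es"), ("explain", "Explica"), ("how does", "Cómo funciona"), ("gravity", "gravedad"), ("entropy", "entropía"), ("quantum", "cuántico")])]

def translate_prompt (prompt : String) (target_language : String) : String :=
  match PySem.Dict.get? pvTransA target_language with
  | none => prompt
  | some t =>
      (PySem.Dict.items t).foldl
        (fun translated kv => PySem.Str.replace translated kv.1 kv.2)
        (PySem.Str.lower prompt)

-- ===== PORT B =====
-- one row per English keyword: (english, German, French, Spanish)
def pvRows : List (String × String × String × String) := [
  ("what is", "Was ist", "Qu'est-ce que", "Qué es"),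
  ("explain", "Erkläre", "Expliquez", "Explica"),
  ("how does", "Wie funktioniert", "Comment fonctionne", "Cómo funciona"),
  ("gravity", "Gravitation", "gravité", "gravedad"),
  ("entropy", "Entropie", "entropie", "entropía"),
  ("quantum", "Quanten", "quantique", "cuántico")]

def pvLangs : List String := ["de", "fr", "es"]

-- row[col] of Source B (columns 1..3; rows are 4-tuples)
def pvCol (col : Nat) (r : String × String × String × String) : String :=
  match col with
  | 1 => r.2.1
  | 2 => r.2.2.1
  | _ => r.2.2.2

-- the while loop of Source B (structural recursion on the remaining length):
-- substitute the first matching keyword at the current position, else copy the char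
def spGo (pairs : List (List Char × List Char)) : Nat → List Char → List Char
  | _, [] => []
  | 0, s => s
  | fuel + 1, c :: rest =>
    match pairs.find? (fun kv => kv.1.isPrefixOf (c :: rest)) with
    | some kv => kv.2 ++ spGo pairs fuel (rest.drop (kv.1.length - 1))
    | none => c :: spGo pairs fuel rest

def translate_prompt_alt (prompt : String) (target_language : String) : String :=
  match PySem.List.index? pvLangs target_language with
  | none => prompt
  | some i =>
      let pairs := pvRows.map (fun r => (r.1.toList, (pvCol (i + 1) r).toList))
      String.ofList (spGo pairs (PySem.Str.lower prompt).toList.length (PySem.Str.lower prompt).toList)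

-- ===== PRECONDITION & SPEC =====
-- On prompts whose lowering contains 'explainntropy' (de) or 'what isxplain'/'what isntropy'/'how doesntropy' (fr),
-- A's sequential passes let the trailing letter of an inserted translation combine with following input text into a
-- later keyword and translate it (text the user never wrote); B's single scan leaves that text untouched, which is
-- the intended behaviour of keyword translation.
def D_translate_prompt (prompt : String) (target_language : String) : Prop :=
  (target_language = "de" ∧ PySem.Str.isIn "explainntropy" (PySem.Str.lower prompt) = true) ∨
  (target_language = "fr" ∧ (PySem.Str.isIn "what isxplain" (PySem.Str.lower prompt) = true ∨
    PySem.Str.isIn "what isntropy" (PySem.Str.lower prompt) = true ∨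
    PySem.Str.isIn "how doesntropy" (PySem.Str.lower prompt) = true))
instance (prompt : String) (target_language : String) : Decidable (D_translate_prompt prompt target_language) := by
  unfold D_translate_prompt; infer_instance

def Spec_translate_prompt (prompt : String) (target_language : String) (out : String) : Prop :=
  ¬ D_translate_prompt prompt target_language → out = translate_prompt_alt prompt target_language
instance (prompt : String) (target_language : String) (out : String) : Decidable (Spec_translate_prompt prompt target_language out) := by
  unfold Spec_translate_prompt; infer_instance

def pvDiffWitness_translate_prompt : String × String := ("explainntropy", "de")
def pvDiffWitnessOut_translate_prompt : String × String := ("ErklärEntropie", "Erklärentropy")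

-- ===== CLAIM (what is proved, stated in full; the proofs are below) =====
def Claim_unchanged_translate_prompt : Prop := ∀ (prompt : String) (target_language : String), Dom_translate_prompt prompt target_language → Spec_translate_prompt prompt target_language (translate_prompt prompt target_language)
def Claim_exact_translate_prompt : Prop := ∀ (prompt : String) (target_language : String), Dom_translate_prompt prompt target_language → D_translate_prompt prompt target_language → translate_prompt prompt target_language ≠ translate_prompt_alt prompt target_language
def Claim_changed_translate_prompt : Prop := Dom_translate_prompt (pvDiffWitness_translate_prompt.1) (pvDiffWitness_translate_prompt.2) ∧ D_translate_prompt (pvDiffWitness_translate_prompt.1) (pvDiffWitness_translate_prompt.2) ∧ translate_prompt (pvDiffWitness_translate_prompt.1) (pvDiffWitness_translate_prompt.2) = pvDiffWitnessOut_translate_prompt.1 ∧ translate_prompt_alt (pvDiffWitness_translate_prompt.1) (pvDiffWitness_translate_prompt.2) = pvDiffWitnessOut_translate_prompt.2 ∧ pvDiffWitnessOut_translate_prompt.1 ≠ pvDiffWitnessOut_translate_prompt.2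

-- ===== LEMMAS AND PROOFS =====

-- structural view of Python's str.replace (sequential leftmost non-overlapping replacement)
def rep (old new : List Char) : List Char → List Char
  | [] => []
  | c :: t => if old.isPrefixOf (c :: t) then new ++ rep old new (t.drop (old.length - 1)) else c :: rep old new t
termination_by s => s.length
decreasing_by
  all_goals simp

theorem rep_nil (old new : List Char) : rep old new [] = [] := by simp [rep]

theorem rep_pos (old new : List Char) (c : Char) (t : List Char)
    (h : old <+: (c :: t)) : rep old new (c :: t) = new ++ rep old new (t.drop (old.length - 1)) := by
  rw [rep]; simp [List.isPrefixOf_iff_prefix.mpr h]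

theorem rep_neg (old new : List Char) (c : Char) (t : List Char)
    (h : ¬ old <+: (c :: t)) : rep old new (c :: t) = c :: rep old new t := by
  have hb : old.isPrefixOf (c :: t) = false := by
    rw [Bool.eq_false_iff]
    intro hh
    exact h (List.isPrefixOf_iff_prefix.mp hh)
  rw [rep]; simp [hb]

theorem go_spec (old new : List Char) (hold : old ≠ []) :
    ∀ fuel (s acc : List Char), s.length ≤ fuel →
      PySem.Chars.replace.go old new fuel s acc = acc.reverse ++ rep old new s := by
  intro fuel
  induction fuel with
  | zero =>
      intro s acc hs
      have : s = [] := by cases s <;> simp_all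
      subst this
      simp [PySem.Chars.replace.go, rep_nil]
  | succ n ih =>
      intro s acc hs
      cases s with
      | nil => simp [PySem.Chars.replace.go, rep_nil]
      | cons c t =>
          by_cases h : old <+: (c :: t)
          · have hpre : old.isPrefixOf (c :: t) = true := List.isPrefixOf_iff_prefix.mpr h
            have hdrop : ((c :: t).drop old.length).length ≤ n := by
              have h1 : 1 ≤ old.length := by cases old <;> simp_all
              simp only [List.length_drop, List.length_cons]
              simp only [List.length_cons] at hs
              omega
            rw [PySem.Chars.replace.go]
            simp only [hpre, if_pos]
            rw [ih _ _ hdrop]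
            have : (c :: t).drop old.length = t.drop (old.length - 1) := by
              cases old with
              | nil => exact absurd rfl hold
              | cons o os => simp
            rw [this, rep_pos old new c t h]
            simp
          · have hpre : old.isPrefixOf (c :: t) = false := by
              rw [Bool.eq_false_iff]
              intro hh
              exact h (List.isPrefixOf_iff_prefix.mp hh)
            rw [PySem.Chars.replace.go]
            simp only [hpre]
            have ht : t.length ≤ n := by simp at hs; omega
            rw [if_neg (by simp), ih _ _ ht, rep_neg old new c t h]
            simp

theorem replace_eq_rep (old new : List Char) (hold : old ≠ []) (s : List Char) :
    PySem.Chars.replace s old new = rep old new s := by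
  rw [PySem.Chars.replace]
  have : old.isEmpty = false := by cases old <;> simp_all
  rw [this]
  simp only [Bool.false_eq_true]
  simpa using go_spec old new hold s.length s [] (le_refl _)

theorem not_prefix_append (x y w : List Char) (h1 : ¬ x <+: y) (h2 : ¬ y <+: x) : ¬ x <+: (y ++ w) := by
  intro h
  rcases List.prefix_or_prefix_of_prefix h (List.prefix_append y w) with h' | h'
  · exact h1 h'
  · exact h2 h'

-- A prefix drawn from XS survives a replace pass backwards: if it prefixes the output it prefixed the input.
theorem rep_pfx_transfer (k v : List Char) (XS : List (List Char))
    (hXcl : ∀ x ∈ XS, x ≠ [] → x.tail ∈ XS)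
    (hXv : ∀ x ∈ XS, x ≠ [] → ¬ x <+: v ∧ ¬ v <+: x) :
    ∀ t x, x ∈ XS → x <+: rep k v t → x <+: t := by
  intro t
  induction t with
  | nil => intro x _ h; rw [rep_nil] at h; exact h
  | cons c t' ih =>
      intro x hx h
      by_cases hk : k <+: (c :: t')
      · rw [rep_pos k v c t' hk] at h
        cases x with
        | nil => exact List.nil_prefix
        | cons a b =>
            exfalso
            rcases hXv _ hx (by simp) with ⟨h1, h2⟩
            exact not_prefix_append _ _ _ h1 h2 h
      · rw [rep_neg k v c t' hk] at h
        cases x with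
        | nil => exact List.nil_prefix
        | cons a b =>
            rcases List.cons_prefix_cons.mp h with ⟨rfl, hb⟩
            have hb' : b <+: t' := ih b (by simpa using hXcl _ hx (by simp)) hb
            exact List.cons_prefix_cons.mpr ⟨rfl, hb'⟩

def seqR (T : List (List Char × List Char)) (s : List Char) : List Char :=
  T.foldl (fun s kv => rep kv.1 kv.2 s) s

theorem seqR_cons_table (k v : List Char) (T : List (List Char × List Char)) (s : List Char) :
    seqR ((k, v) :: T) s = seqR T (rep k v s) := rfl

theorem seqR_pfx_transfer (T : List (List Char × List Char)) (XS : List (List Char))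
    (hXcl : ∀ x ∈ XS, x ≠ [] → x.tail ∈ XS)
    (hXv : ∀ p ∈ T, ∀ x ∈ XS, x ≠ [] → ¬ x <+: p.2 ∧ ¬ p.2 <+: x) :
    ∀ t x, x ∈ XS → x <+: seqR T t → x <+: t := by
  induction T with
  | nil => intro t x _ h; exact h
  | cons p T' ih =>
      intro t x hx h
      rw [seqR_cons_table p.1 p.2 T' t] at h
      have h1 : x <+: rep p.1 p.2 t := ih (fun q hq => hXv q (by simp [hq])) _ x hx h
      exact rep_pfx_transfer p.1 p.2 XS hXcl (hXv p (by simp)) t x hx h1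

theorem seqR_nil_input (T : List (List Char × List Char)) (hk : ∀ p ∈ T, p.1 ≠ []) : seqR T [] = [] := by
  induction T with
  | nil => rfl
  | cons p T' ih =>
      rw [seqR_cons_table p.1 p.2 T' [], rep_nil]
      exact ih (fun q hq => hk q (by simp [hq]))

-- no table key matches at the front: all passes keep the head character
theorem seqR_cons_char (T : List (List Char × List Char)) (XS : List (List Char))
    (hXcl : ∀ x ∈ XS, x ≠ [] → x.tail ∈ XS)
    (hXv : ∀ p ∈ T, ∀ x ∈ XS, x ≠ [] → ¬ x <+: p.2 ∧ ¬ p.2 <+: x)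
    (hXk : ∀ p ∈ T, ∀ x ∈ p.1.tails, x ∈ XS) :
    ∀ (c : Char) (u : List Char), (∀ p ∈ T, ¬ p.1 <+: (c :: u)) →
      seqR T (c :: u) = c :: seqR T u := by
  induction T with
  | nil => intro c u _; rfl
  | cons p T' ih =>
      intro c u hnm
      rw [seqR_cons_table p.1 p.2 T' (c :: u),
          rep_neg p.1 p.2 c u (hnm p (by simp)),
          seqR_cons_table p.1 p.2 T' u]
      apply ih (fun q hq => hXv q (by simp [hq])) (fun q hq => hXk q (by simp [hq]))
      intro q hq hpre
      cases hq1 : q.1 with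
      | nil =>
          exact hnm q (by simp [hq]) (by rw [hq1]; exact List.nil_prefix)
      | cons a b =>
          rw [hq1] at hpre
          rcases List.cons_prefix_cons.mp hpre with ⟨rfl, hb⟩
          have hbX : b ∈ XS := by
            have := hXk q (by simp [hq]) b
            apply this
            rw [hq1, List.mem_tails]
            exact ⟨[a], rfl⟩
          have : b <+: u :=
            rep_pfx_transfer p.1 p.2 XS hXcl (hXv p (by simp)) u b hbX hb
          exact hnm q (by simp [hq]) (by rw [hq1]; exact List.cons_prefix_cons.mpr ⟨rfl, this⟩)

theorem rep_append (k v y w : List Char)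
    (h : ∀ y' ∈ y.tails, y' ≠ [] → ¬ k <+: (y' ++ w)) :
    rep k v (y ++ w) = y ++ rep k v w := by
  induction y with
  | nil => rfl
  | cons a y' ih =>
      have hnm : ¬ k <+: ((a :: y') ++ w) := h (a :: y') (by simp [List.mem_tails]) (by simp)
      rw [List.cons_append, rep_neg k v a (y' ++ w) hnm,
          ih (fun z hz hzne => h z (by
            rw [List.mem_tails] at hz ⊢
            exact hz.trans (List.suffix_cons a y')) hzne)]
      rfl

-- all keys of T pass over the block y unchanged (no key can match inside y or spanning out of it)
theorem seqR_append_keyfree (T : List (List Char × List Char)) (y : List Char)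
    (H : ∀ p ∈ T, ∀ y' ∈ y.tails, y' ≠ [] → ¬ p.1 <+: y' ∧ ¬ y' <+: p.1) :
    ∀ w, seqR T (y ++ w) = y ++ seqR T w := by
  induction T with
  | nil => intro w; rfl
  | cons p T' ih =>
      intro w
      rw [seqR_cons_table p.1 p.2 T' (y ++ w),
          rep_append p.1 p.2 y w (fun y' hy' hne =>
            not_prefix_append _ _ _ (H p (by simp) y' hy' hne).1 (H p (by simp) y' hy' hne).2),
          ih (fun q hq => H q (by simp [hq])), seqR_cons_table p.1 p.2 T' w]

-- all keys of T pass over the inserted value v unchanged, given no spanning occurrence can complete (¬ b <+: Z)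
theorem seqR_append_value (XS : List (List Char))
    (hXcl : ∀ x ∈ XS, x ≠ [] → x.tail ∈ XS) :
    ∀ (T : List (List Char × List Char)) (v Z : List Char),
    (∀ p ∈ T, ∀ x ∈ XS, x ≠ [] → ¬ x <+: p.2 ∧ ¬ p.2 <+: x) →
    (∀ p ∈ T, ∀ x ∈ p.1.tails, x ∈ XS) →
    (∀ p ∈ T, ∀ y' ∈ v.tails, y' ≠ [] →
      (¬ p.1 <+: y' ∧ ¬ y' <+: p.1) ∨ (y' ≠ p.1 ∧ y' <+: p.1 ∧ ¬ (p.1.drop y'.length) <+: Z)) →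
    seqR T (v ++ Z) = v ++ seqR T Z := by
  intro T
  induction T with
  | nil => intro v Z _ _ _; rfl
  | cons p T' ih =>
      intro v Z hXv hXk H
      have hstep : rep p.1 p.2 (v ++ Z) = v ++ rep p.1 p.2 Z := by
        apply rep_append
        intro y' hy' hne
        rcases H p (by simp) y' hy' hne with ⟨h1, h2⟩ | ⟨hne', hpre, hnb⟩
        · exact not_prefix_append _ _ _ h1 h2
        · intro hcon
          rcases hpre with ⟨b, hb⟩
          have hbZ : b <+: Z := by
            rw [← hb] at hcon
            exact (List.prefix_append_right_inj y').mp hcon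
          have : p.1.drop y'.length = b := by rw [← hb]; simp
          rw [this] at hnb
          exact hnb hbZ
      rw [seqR_cons_table p.1 p.2 T' (v ++ Z), hstep, seqR_cons_table p.1 p.2 T' Z]
      apply ih v (rep p.1 p.2 Z) (fun q hq => hXv q (by simp [hq])) (fun q hq => hXk q (by simp [hq]))
      intro q hq y' hy' hne
      rcases H q (by simp [hq]) y' hy' hne with h | ⟨hne', hpre, hnb⟩
      · exact Or.inl h
      · refine Or.inr ⟨hne', hpre, ?_⟩
        intro hcon
        have hbX : q.1.drop y'.length ∈ XS := by
          have := hXk q (by simp [hq]) (q.1.drop y'.length)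
          apply this
          rw [List.mem_tails]
          exact List.drop_suffix _ _
        exact hnb (rep_pfx_transfer p.1 p.2 XS hXcl (hXv p (by simp)) Z _ hbX hcon)

-- well-founded view of the scan, for the proofs
def spR (table : List (List Char × List Char)) : List Char → List Char
  | [] => []
  | c :: rest =>
    match table.find? (fun kv => kv.1.isPrefixOf (c :: rest)) with
    | some kv => kv.2 ++ spR table (rest.drop (kv.1.length - 1))
    | none => c :: spR table rest
termination_by s => s.length
decreasing_by
  all_goals simp

theorem spAux_nil (T : List (List Char × List Char)) : spR T [] = [] := by simp [spR]

theorem spAux_cons_none (T : List (List Char × List Char)) (c : Char) (rest : List Char)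
    (h : T.find? (fun kv => kv.1.isPrefixOf (c :: rest)) = none) :
    spR T (c :: rest) = c :: spR T rest := by
  rw [spR, h]

theorem spAux_cons_some (T : List (List Char × List Char)) (c : Char) (rest : List Char)
    (kv : List Char × List Char)
    (h : T.find? (fun kv => kv.1.isPrefixOf (c :: rest)) = some kv) :
    spR T (c :: rest) = kv.2 ++ spR T (rest.drop (kv.1.length - 1)) := by
  rw [spR, h]

theorem spGo_eq_spR (T : List (List Char × List Char)) :
    ∀ fuel (s : List Char), s.length ≤ fuel → spGo T fuel s = spR T s := by
  intro fuel
  induction fuel with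
  | zero =>
      intro s hs
      have : s = [] := by cases s <;> simp_all
      subst this
      simp [spGo, spR]
  | succ n ih =>
      intro s hs
      cases s with
      | nil => simp [spGo, spR]
      | cons c rest =>
          cases hfind : T.find? (fun kv => kv.1.isPrefixOf (c :: rest)) with
          | none =>
              rw [spGo, hfind, spAux_cons_none T c rest hfind]
              dsimp only
              rw [ih rest (by simp only [List.length_cons] at hs; omega)]
          | some kv =>
              rw [spGo, hfind, spAux_cons_some T c rest kv hfind]
              dsimp only
              rw [ih _ (by simp only [List.length_drop, List.length_cons] at hs ⊢; omega)]

-- the ordered no-cascade condition down the table: a value's suffix may only complete a LATER key if that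
-- spanning occurrence is one of the trigger substrings
def trigOK (Trigs : List (List Char)) : List (List Char × List Char) → Bool
  | [] => true
  | p :: rest =>
      (rest.all fun q => p.2.tails.all fun y' =>
        y'.isEmpty ||
        ((!(q.1.isPrefixOf y') && !(y'.isPrefixOf q.1)) ||
         ((!(y' == q.1)) && y'.isPrefixOf q.1 && Trigs.contains (p.1 ++ q.1.drop y'.length)))) &&
      trigOK Trigs rest

theorem trigOK_mem (Trigs : List (List Char)) :
    ∀ (T₁ : List (List Char × List Char)) (p : List Char × List Char) (T₂ : List (List Char × List Char)),
      trigOK Trigs (T₁ ++ p :: T₂) = true →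
      ∀ q ∈ T₂, ∀ y' ∈ p.2.tails, y' ≠ [] →
        (¬ q.1 <+: y' ∧ ¬ y' <+: q.1) ∨ (y' ≠ q.1 ∧ y' <+: q.1 ∧ (p.1 ++ q.1.drop y'.length) ∈ Trigs) := by
  intro T₁
  induction T₁ with
  | nil =>
      intro p T₂ h q hq y' hy' hne
      rw [List.nil_append, trigOK, Bool.and_eq_true] at h
      have h1 := List.all_eq_true.mp h.1 q hq
      have h2 := List.all_eq_true.mp h1 y' hy'
      simp only [Bool.or_eq_true, Bool.and_eq_true, Bool.not_eq_true', Bool.eq_false_iff,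
        List.isEmpty_iff, beq_iff_eq, List.isPrefixOf_iff_prefix, List.contains_eq_mem,
        decide_eq_true_eq, ne_eq] at h2
      rcases h2 with hemp | hrest
      · exact absurd hemp hne
      · rcases hrest with ⟨hna, hnb⟩ | ⟨⟨hneq, hpre⟩, hmem⟩
        · exact Or.inl ⟨hna, hnb⟩
        · exact Or.inr ⟨hneq, hpre, hmem⟩
  | cons a T₁' ih =>
      intro p T₂ h
      rw [List.cons_append, trigOK, Bool.and_eq_true] at h
      exact ih p T₂ h.2

-- a single replace pass crosses an inert block unchanged (no occurrence can start inside it)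
theorem rep_over (k v y : List Char)
    (h : ∀ y' ∈ y.tails, y' ≠ [] → ¬ k <+: y' ∧ ¬ y' <+: k) (w : List Char) :
    rep k v (y ++ w) = y ++ rep k v w :=
  rep_append k v y w (fun y' hy hne => not_prefix_append _ _ _ (h y' hy hne).1 (h y' hy hne).2)

theorem rep_front (k v : List Char) (hkne : k ≠ []) (z : List Char) :
    rep k v (k ++ z) = v ++ rep k v z := by
  cases hkc : k with
  | nil => exact absurd hkc hkne
  | cons a b =>
      have hpre : (a :: b) <+: ((a :: b) ++ z) := List.prefix_append _ _
      rw [List.cons_append] at hpre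
      rw [List.cons_append, rep_pos (a :: b) v a (b ++ z) hpre]
      have hd : (b ++ z).drop ((a :: b).length - 1) = z := List.drop_left
      rw [hd]

-- the scan crosses an inert block unchanged
theorem spR_over (T : List (List Char × List Char)) (y : List Char)
    (h : ∀ y' ∈ y.tails, y' ≠ [] → ∀ p ∈ T, ¬ p.1 <+: y' ∧ ¬ y' <+: p.1) :
    ∀ w, spR T (y ++ w) = y ++ spR T w := by
  induction y with
  | nil => intro w; rfl
  | cons a y' ih =>
      intro w
      have hnone : T.find? (fun kv => kv.1.isPrefixOf ((a :: y') ++ w)) = none := by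
        rw [List.find?_eq_none]
        intro p hp hb
        have hpre : p.1 <+: ((a :: y') ++ w) := by simpa using hb
        have hf := h (a :: y') (by simp [List.mem_tails]) (by simp) p hp
        exact not_prefix_append _ _ _ hf.1 hf.2 hpre
      rw [List.cons_append, spAux_cons_none T a (y' ++ w) hnone,
          ih (fun z hz hzne => h z (by
            rw [List.mem_tails] at hz ⊢
            exact hz.trans (List.suffix_cons a y')) hzne) w]
      rfl

-- the scan consumes a key match at the front
theorem spR_step (T : List (List Char × List Char)) (c : Char) (t k v w : List Char)
    (hkne : k ≠ [])
    (hfind : T.find? (fun kv => kv.1.isPrefixOf (c :: t)) = some (k, v))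
    (hw : k ++ w = c :: t) :
    spR T (c :: t) = v ++ spR T w := by
  rw [spAux_cons_some T c t (k, v) hfind]
  congr 1
  have hdw : t.drop (k.length - 1) = w := by
    cases hkc : k with
    | nil => exact absurd hkc hkne
    | cons a b =>
        rw [hkc, List.cons_append] at hw
        injection hw with h1 h2
        rw [← h2]
        simp
  rw [hdw]

-- the sequential passes consume a key match at the front, when no trigger substring starts there
theorem step_some (T : List (List Char × List Char)) (XS : List (List Char)) (Trigs : List (List Char))
    (hk : ∀ p ∈ T, p.1 ≠ [])
    (hXcl : ∀ x ∈ XS, x ≠ [] → x.tail ∈ XS)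
    (hXk : ∀ p ∈ T, ∀ x ∈ p.1.tails, x ∈ XS)
    (hXv : ∀ p ∈ T, ∀ x ∈ XS, x ≠ [] → ¬ x <+: p.2 ∧ ¬ p.2 <+: x)
    (hkk : ∀ p ∈ T, ∀ q ∈ T, p.1 ≠ q.1 → ∀ y' ∈ q.1.tails, y' ≠ [] → ¬ p.1 <+: y' ∧ ¬ y' <+: p.1)
    (hnd : (T.map Prod.fst).Nodup)
    (htrig : trigOK Trigs T = true)
    (c : Char) (t k v w : List Char)
    (hfind : T.find? (fun kv => kv.1.isPrefixOf (c :: t)) = some (k, v))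
    (hw : k ++ w = c :: t)
    (hfr : ∀ u ∈ Trigs, ¬ u <+: (c :: t)) :
    seqR T (c :: t) = v ++ seqR T w := by
  rcases List.find?_eq_some_iff_append.mp hfind with ⟨hpv, T₁, T₂, hTsplit, hT₁⟩
  have hkT : (k, v) ∈ T := by rw [hTsplit]; simp
  have hkne : k ≠ [] := hk (k, v) hkT
  -- step 1: the passes before (k,v) leave the leading k and only rewrite w
  have hT₁keys : ∀ p ∈ T₁, ∀ y' ∈ k.tails, y' ≠ [] → ¬ p.1 <+: y' ∧ ¬ y' <+: p.1 := by
    intro p hp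
    have hpT : p ∈ T := by rw [hTsplit]; simp [hp]
    have hne : p.1 ≠ k := by
      intro hEq
      rw [hTsplit] at hnd
      simp only [List.map_append, List.map_cons] at hnd
      rcases (List.nodup_append.mp hnd) with ⟨_, _, hdisj⟩
      have hmem1 : p.1 ∈ List.map Prod.fst T₁ := List.mem_map_of_mem hp
      exact hdisj p.1 hmem1 k (by simp) hEq
    exact hkk p hpT (k, v) hkT hne
  have hstep1 : ∀ z, seqR T₁ (k ++ z) = k ++ seqR T₁ z :=
    fun z => seqR_append_keyfree T₁ k (fun p hp => hT₁keys p hp) z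
  -- step 3: the later passes leave the inserted v alone (no trigger at the front of s)
  have htrigkv := trigOK_mem Trigs T₁ (k, v) T₂ (hTsplit ▸ htrig)
  have hstep3 : seqR T₂ (v ++ rep k v (seqR T₁ w)) = v ++ seqR T₂ (rep k v (seqR T₁ w)) := by
    apply seqR_append_value XS hXcl T₂ v (rep k v (seqR T₁ w))
      (fun q hq => hXv q (by rw [hTsplit]; simp [hq]))
      (fun q hq => hXk q (by rw [hTsplit]; simp [hq]))
    intro q hq y' hy' hne
    rcases htrigkv q hq y' hy' hne with h | ⟨hne', hpre, htr⟩
    · exact Or.inl h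
    · refine Or.inr ⟨hne', hpre, ?_⟩
      intro hcon
      set b := q.1.drop y'.length with hbdef
      have hbX : b ∈ XS := hXk q (by rw [hTsplit]; simp [hq]) b ((List.mem_tails _ _).mpr (List.drop_suffix _ _))
      have hb1 : b <+: seqR T₁ w :=
        rep_pfx_transfer k v XS hXcl (hXv (k, v) hkT) (seqR T₁ w) b hbX hcon
      have hb2 : b <+: w :=
        seqR_pfx_transfer T₁ XS hXcl (fun q' hq' => hXv q' (by rw [hTsplit]; simp [hq'])) w b hbX hb1
      have hfrb : (k ++ b) <+: (c :: t) := by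
        rw [← hw]
        rcases hb2 with ⟨z, hz⟩
        exact ⟨z, by rw [List.append_assoc, hz]⟩
      exact hfr (k ++ b) htr hfrb
  rw [hTsplit]
  unfold seqR
  rw [List.foldl_append]
  show seqR ((k, v) :: T₂) (seqR T₁ (c :: t)) = v ++ seqR (T₁ ++ (k, v) :: T₂) w
  rw [← hw, hstep1 w, seqR_cons_table k v T₂ (k ++ seqR T₁ w), rep_front k v hkne (seqR T₁ w), hstep3]
  unfold seqR
  rw [List.foldl_append]
  rfl

-- the main equivalence: six sequential replace passes = one left-to-right scan, on trigger-free input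
theorem main_eq (T : List (List Char × List Char)) (XS : List (List Char)) (Trigs : List (List Char))
    (hk : ∀ p ∈ T, p.1 ≠ [])
    (hXcl : ∀ x ∈ XS, x ≠ [] → x.tail ∈ XS)
    (hXk : ∀ p ∈ T, ∀ x ∈ p.1.tails, x ∈ XS)
    (hXv : ∀ p ∈ T, ∀ x ∈ XS, x ≠ [] → ¬ x <+: p.2 ∧ ¬ p.2 <+: x)
    (hkk : ∀ p ∈ T, ∀ q ∈ T, p.1 ≠ q.1 → ∀ y' ∈ q.1.tails, y' ≠ [] → ¬ p.1 <+: y' ∧ ¬ y' <+: p.1)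
    (hnd : (T.map Prod.fst).Nodup)
    (htrig : trigOK Trigs T = true) :
    ∀ n (s : List Char), s.length ≤ n → (∀ u ∈ Trigs, ¬ u <:+: s) → seqR T s = spR T s := by
  intro n
  induction n with
  | zero =>
      intro s hs _
      have : s = [] := by cases s <;> simp_all
      subst this
      rw [seqR_nil_input T hk, spAux_nil]
  | succ n ih =>
      intro s hs htf
      cases s with
      | nil => rw [seqR_nil_input T hk, spAux_nil]
      | cons c t =>
          cases hfind : T.find? (fun kv => kv.1.isPrefixOf (c :: t)) with
          | none =>
              have hnm : ∀ p ∈ T, ¬ p.1 <+: (c :: t) := by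
                intro p hp hpre
                have := List.find?_eq_none.mp hfind p hp
                simp [List.isPrefixOf_iff_prefix.mpr hpre] at this
              rw [spAux_cons_none T c t hfind,
                  seqR_cons_char T XS hXcl hXv hXk c t hnm]
              congr 1
              apply ih t (by simp at hs; omega)
              intro u hu hinf
              exact htf u hu (hinf.trans (List.IsSuffix.isInfix (List.suffix_cons c t)))
          | some kv =>
              obtain ⟨k, v⟩ := kv
              have hkpre : k <+: (c :: t) :=
                List.isPrefixOf_iff_prefix.mp (by simpa using (List.find?_eq_some_iff_append.mp hfind).1)
              obtain ⟨w, hw⟩ := hkpre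
              have hkT : (k, v) ∈ T := List.mem_of_find?_eq_some hfind
              have hkne : k ≠ [] := hk (k, v) hkT
              have hfr : ∀ u ∈ Trigs, ¬ u <+: (c :: t) := fun u hu hp => htf u hu hp.isInfix
              rw [step_some T XS Trigs hk hXcl hXk hXv hkk hnd htrig c t k v w hfind hw hfr,
                  spR_step T c t k v w hkne hfind hw]
              congr 1
              have hlen : w.length ≤ n := by
                have hlw : k.length + w.length = t.length + 1 := by
                  have := congrArg List.length hw
                  simpa using this
                have hk1 : 1 ≤ k.length := by cases k <;> simp_all
                simp only [List.length_cons] at hs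
                omega
              apply ih w hlen
              intro u hu hinf
              refine htf u hu (hinf.trans ?_)
              rw [← hw]
              exact (List.suffix_append k w).isInfix

-- the disagreement: on input that does contain a trigger substring, the two programs differ
theorem main_neq (T : List (List Char × List Char)) (XS : List (List Char)) (Trigs : List (List Char))
    (hk : ∀ p ∈ T, p.1 ≠ [])
    (hXcl : ∀ x ∈ XS, x ≠ [] → x.tail ∈ XS)
    (hXk : ∀ p ∈ T, ∀ x ∈ p.1.tails, x ∈ XS)
    (hXv : ∀ p ∈ T, ∀ x ∈ XS, x ≠ [] → ¬ x <+: p.2 ∧ ¬ p.2 <+: x)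
    (hkk : ∀ p ∈ T, ∀ q ∈ T, p.1 ≠ q.1 → ∀ y' ∈ q.1.tails, y' ≠ [] → ¬ p.1 <+: y' ∧ ¬ y' <+: p.1)
    (hnd : (T.map Prod.fst).Nodup)
    (htrig : trigOK Trigs T = true)
    (hself : ∀ p ∈ T, ∀ q ∈ T, ∀ y' ∈ q.1.tails, y' ≠ [] → y' ≠ q.1 → ¬ p.1 <+: y' ∧ ¬ y' <+: p.1)
    (hkey : ∀ u ∈ Trigs, ∃ kv, kv ∈ T ∧ kv.1 <+: u)
    (hfront : ∀ u ∈ Trigs, ∀ r, seqR T (u ++ r) ≠ spR T (u ++ r)) :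
    ∀ n (s : List Char), s.length ≤ n → (∃ u ∈ Trigs, u <:+: s) → seqR T s ≠ spR T s := by
  intro n
  induction n with
  | zero =>
      intro s hs htr
      have hsnil : s = [] := by cases s <;> simp_all
      subst hsnil
      obtain ⟨u, hu, hinf⟩ := htr
      have hunil : u = [] := List.eq_nil_of_infix_nil hinf
      obtain ⟨kv, hkvT, hkvpre⟩ := hkey u hu
      rw [hunil] at hkvpre
      exact absurd (List.prefix_nil.mp hkvpre) (hk kv hkvT)
  | succ n ih =>
      intro s hs htr
      cases s with
      | nil =>
          obtain ⟨u, hu, hinf⟩ := htr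
          have hunil : u = [] := List.eq_nil_of_infix_nil hinf
          obtain ⟨kv, hkvT, hkvpre⟩ := hkey u hu
          rw [hunil] at hkvpre
          exact absurd (List.prefix_nil.mp hkvpre) (hk kv hkvT)
      | cons c t =>
          obtain ⟨u, hu, hinf⟩ := htr
          by_cases hfr : ∃ u' ∈ Trigs, u' <+: (c :: t)
          · obtain ⟨u', hu', r, hr⟩ := hfr
            rw [← hr]
            exact hfront u' hu' r
          · push_neg at hfr
            cases hfind : T.find? (fun kv => kv.1.isPrefixOf (c :: t)) with
            | none =>
                have hnm : ∀ p ∈ T, ¬ p.1 <+: (c :: t) := by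
                  intro p hp hpre
                  have := List.find?_eq_none.mp hfind p hp
                  simp [List.isPrefixOf_iff_prefix.mpr hpre] at this
                rw [spAux_cons_none T c t hfind,
                    seqR_cons_char T XS hXcl hXv hXk c t hnm]
                have hut : u <:+: t := by
                  rcases List.infix_cons_iff.mp hinf with h | h
                  · exact absurd h (hfr u hu)
                  · exact h
                intro heq
                injection heq with h1 h2
                exact ih t (by simp at hs; omega) ⟨u, hu, hut⟩ h2
            | some kv =>
                obtain ⟨k, v⟩ := kv
                have hkpre : k <+: (c :: t) :=
                  List.isPrefixOf_iff_prefix.mp (by simpa using (List.find?_eq_some_iff_append.mp hfind).1)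
                obtain ⟨w, hw⟩ := hkpre
                have hkT : (k, v) ∈ T := List.mem_of_find?_eq_some hfind
                have hkne : k ≠ [] := hk (k, v) hkT
                rw [step_some T XS Trigs hk hXcl hXk hXv hkk hnd htrig c t k v w hfind hw hfr,
                    spR_step T c t k v w hkne hfind hw]
                -- the trigger occurrence lies inside w
                have huw : u <:+: w := by
                  rcases List.infix_iff_prefix_suffix.mp hinf with ⟨t', hut', hts⟩
                  obtain ⟨pre, hpre⟩ := hts
                  rw [← hw] at hpre
                  obtain ⟨⟨k0, v0⟩, hkv0T, hk0u⟩ := hkey u hu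
                  by_cases hple : pre.length ≤ k.length
                  · have hprek : pre <+: k :=
                      List.prefix_of_prefix_length_le ⟨t', hpre⟩ (List.prefix_append k w) (by simpa using hple)
                    obtain ⟨m, hm⟩ := hprek
                    have ht' : t' = m ++ w := by
                      have h2 : pre ++ t' = pre ++ (m ++ w) := by rw [hpre, ← hm, List.append_assoc]
                      exact List.append_cancel_left h2
                    by_cases hpre0 : pre = []
                    · subst hpre0
                      exfalso
                      refine hfr u hu ?_
                      have ht'kw : t' = k ++ w := by simpa using hpre
                      rw [← hw, ← ht'kw]
                      exact hut'
                    · by_cases hmnil : m = []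
                      · subst hmnil
                        rw [List.nil_append] at ht'
                        rw [ht'] at hut'
                        exact hut'.isInfix
                      · exfalso
                        have hmk : m ∈ k.tails := (List.mem_tails _ _).mpr ⟨pre, hm⟩
                        have hmnek : m ≠ k := by
                          intro hmk'
                          have hlm := congrArg List.length hm
                          rw [hmk'] at hlm
                          simp at hlm
                          exact hpre0 hlm
                        have hko : k0 <+: t' := hk0u.trans hut'
                        rw [ht'] at hko
                        have hf := hself (k0, v0) hkv0T (k, v) hkT m hmk hmnil hmnek
                        exact not_prefix_append _ _ _ hf.1 hf.2 hko
                  · push_neg at hple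
                    have hkpre2 : k <+: pre :=
                      List.prefix_of_prefix_length_le (List.prefix_append k w) ⟨t', hpre⟩ (by omega)
                    obtain ⟨pre', hpre'⟩ := hkpre2
                    have h3 : k ++ (pre' ++ t') = k ++ w := by rw [← List.append_assoc, hpre', hpre]
                    exact List.infix_iff_prefix_suffix.mpr ⟨t', hut', ⟨pre', List.append_cancel_left h3⟩⟩
                intro heq
                have hlen : w.length ≤ n := by
                  have hlw : k.length + w.length = t.length + 1 := by
                    have := congrArg List.length hw
                    simpa using this
                  have hk1 : 1 ≤ k.length := by cases k <;> simp_all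
                  simp only [List.length_cons] at hs
                  omega
                exact ih w hlen ⟨u, hu, huw⟩ (List.append_cancel_left heq)

-- ===== language instantiation and string-level assembly =====

def dDe : PySem.Dict String String := PySem.Dict.ofList [("what is", "Was ist"), ("explain", "Erkläre"), ("how does", "Wie funktioniert"), ("gravity", "Gravitation"), ("entropy", "Entropie"), ("quantum", "Quanten")]
def dFr : PySem.Dict String String := PySem.Dict.ofList [("what is", "Qu'est-ce que"), ("explain", "Expliquez"), ("how does", "Comment fonctionne"), ("gravity", "gravité"), ("entropy", "entropie"), ("quantum", "quantique")]
def dEs : PySem.Dict String String := PySem.Dict.ofList [("what is", "Qué es"), ("explain", "Explica"), ("how does", "Cómo funciona"), ("gravity", "gravedad"), ("entropy", "entropía"), ("quantum", "cuántico")]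

def tbl (d : PySem.Dict String String) : List (List Char × List Char) :=
  (PySem.Dict.items d).map (fun kv => (kv.1.toList, kv.2.toList))

def XSkeys : List (List Char) :=
  ["what is".toList, "explain".toList, "how does".toList, "gravity".toList, "entropy".toList, "quantum".toList].flatMap List.tails

def TrigsDe : List (List Char) := ["explainntropy".toList]
def TrigsFr : List (List Char) := ["what isxplain".toList, "what isntropy".toList, "how doesntropy".toList]
def TrigsEs : List (List Char) := []

def chSeq (T : List (List Char × List Char)) (s : List Char) : List Char :=
  T.foldl (fun s kv => PySem.Chars.replace s kv.1 kv.2) s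

theorem strSeq_toList (L : List (String × String)) :
    ∀ s : String,
      (L.foldl (fun acc kv => PySem.Str.replace acc kv.1 kv.2) s).toList =
        chSeq (L.map (fun kv => (kv.1.toList, kv.2.toList))) s.toList := by
  induction L with
  | nil => intro s; rfl
  | cons p L' ih =>
      intro s
      show (L'.foldl _ (PySem.Str.replace s p.1 p.2)).toList = chSeq _ _
      rw [ih (PySem.Str.replace s p.1 p.2)]
      unfold chSeq
      rw [List.map_cons, List.foldl_cons, PySem.Str.toList_replace]

theorem chSeq_eq_seqR (T : List (List Char × List Char)) (hk : ∀ p ∈ T, p.1 ≠ []) :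
    ∀ s, chSeq T s = seqR T s := by
  induction T with
  | nil => intro s; rfl
  | cons p T' ih =>
      intro s
      show chSeq T' (PySem.Chars.replace s p.1 p.2) = seqR T' (rep p.1 p.2 s)
      rw [replace_eq_rep p.1 p.2 (hk p (by simp)) s]
      exact ih (fun q hq => hk q (by simp [hq])) _

theorem portA_toList (d : PySem.Dict String String) (hk : ∀ p ∈ tbl d, p.1 ≠ []) (s : String) :
    ((PySem.Dict.items d).foldl (fun a kv => PySem.Str.replace a kv.1 kv.2) (PySem.Str.lower s)).toList
      = seqR (tbl d) (PySem.Str.lower s).toList := by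
  rw [strSeq_toList]
  exact chSeq_eq_seqR (tbl d) hk _

-- B's row table, column j+1 selected, equals the char table of the corresponding per-language dict
theorem rowsCol_de : pvRows.map (fun r => (r.1.toList, (pvCol 1 r).toList)) = tbl dDe := by decide
theorem rowsCol_fr : pvRows.map (fun r => (r.1.toList, (pvCol 2 r).toList)) = tbl dFr := by decide
theorem rowsCol_es : pvRows.map (fun r => (r.1.toList, (pvCol 3 r).toList)) = tbl dEs := by decide

theorem altB_eq (lang : String) (d : PySem.Dict String String) (i : Nat)
    (hi : PySem.List.index? pvLangs lang = some i)
    (ht : pvRows.map (fun r => (r.1.toList, (pvCol (i + 1) r).toList)) = tbl d) (p : String) :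
    translate_prompt_alt p lang
      = String.ofList (spGo (tbl d) (PySem.Str.lower p).toList.length (PySem.Str.lower p).toList) := by
  unfold translate_prompt_alt
  rw [hi]
  dsimp only
  rw [ht]

theorem altB_none (lang : String) (h1 : lang ≠ "de") (h2 : lang ≠ "fr") (h3 : lang ≠ "es") (p : String) :
    translate_prompt_alt p lang = p := by
  unfold translate_prompt_alt
  have : PySem.List.index? pvLangs lang = none := by
    rw [PySem.List.index?_eq_none_iff]
    simp [pvLangs, h1, h2, h3]
  rw [this]

theorem portB_toList (d : PySem.Dict String String) (s : String) :
    (String.ofList (spGo (tbl d) (PySem.Str.lower s).toList.length (PySem.Str.lower s).toList)).toList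
      = spR (tbl d) (PySem.Str.lower s).toList := by
  rw [String.toList_ofList, spGo_eq_spR _ _ _ (le_refl _)]

theorem assemble (d : PySem.Dict String String) (Trigs : List (List Char)) (s : String)
    (hmain : ∀ t : List Char, (∀ u ∈ Trigs, ¬ u <:+: t) → seqR (tbl d) t = spR (tbl d) t)
    (htf : ∀ u ∈ Trigs, ¬ u <:+: (PySem.Str.lower s).toList)
    (hk : ∀ p ∈ tbl d, p.1 ≠ []) :
    (PySem.Dict.items d).foldl (fun a kv => PySem.Str.replace a kv.1 kv.2) (PySem.Str.lower s)
      = String.ofList (spGo (tbl d) (PySem.Str.lower s).toList.length (PySem.Str.lower s).toList) := by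
  have hTL : ((PySem.Dict.items d).foldl (fun a kv => PySem.Str.replace a kv.1 kv.2) (PySem.Str.lower s)).toList
      = seqR (tbl d) (PySem.Str.lower s).toList := portA_toList d hk s
  have h2 : (PySem.Dict.items d).foldl (fun a kv => PySem.Str.replace a kv.1 kv.2) (PySem.Str.lower s)
      = String.ofList (((PySem.Dict.items d).foldl (fun a kv => PySem.Str.replace a kv.1 kv.2) (PySem.Str.lower s)).toList) :=
    Eq.symm String.ofList_toList
  rw [h2]
  apply congrArg String.ofList
  rw [hTL, hmain _ htf, spGo_eq_spR _ _ _ (le_refl _)]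

theorem main_de : ∀ t : List Char, (∀ u ∈ TrigsDe, ¬ u <:+: t) → seqR (tbl dDe) t = spR (tbl dDe) t :=
  fun t ht => main_eq (tbl dDe) XSkeys TrigsDe (by decide) (by decide) (by decide) (by decide)
    (by decide) (by decide) (by decide) t.length t (le_refl _) ht

theorem main_fr : ∀ t : List Char, (∀ u ∈ TrigsFr, ¬ u <:+: t) → seqR (tbl dFr) t = spR (tbl dFr) t :=
  fun t ht => main_eq (tbl dFr) XSkeys TrigsFr (by decide) (by decide) (by decide) (by decide)
    (by decide) (by decide) (by decide) t.length t (le_refl _) ht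

theorem main_es : ∀ t : List Char, (∀ u ∈ TrigsEs, ¬ u <:+: t) → seqR (tbl dEs) t = spR (tbl dEs) t :=
  fun t ht => main_eq (tbl dEs) XSkeys TrigsEs (by decide) (by decide) (by decide) (by decide)
    (by decide) (by decide) (by decide) t.length t (le_refl _) ht

theorem getA_de : PySem.Dict.get? pvTransA "de" = some dDe := by rfl
theorem getA_fr : PySem.Dict.get? pvTransA "fr" = some dFr := by rfl
theorem getA_es : PySem.Dict.get? pvTransA "es" = some dEs := by rfl

theorem getA_none (lang : String) (h1 : lang ≠ "de") (h2 : lang ≠ "fr") (h3 : lang ≠ "es") :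
    PySem.Dict.get? pvTransA lang = none := by
  have e1 : pvTransA = PySem.Dict.mk [("de", dDe), ("fr", dFr), ("es", dEs)] := by rfl
  have b1 : (("de" : String) == lang) = false := beq_false_of_ne (fun h => h1 h.symm)
  have b2 : (("fr" : String) == lang) = false := beq_false_of_ne (fun h => h2 h.symm)
  have b3 : (("es" : String) == lang) = false := beq_false_of_ne (fun h => h3 h.symm)
  rw [e1]
  rw [PySem.Dict.get?_mk_cons, b1]
  simp only [Bool.false_eq_true, if_false]
  rw [PySem.Dict.get?_mk_cons, b2]
  simp only [Bool.false_eq_true, if_false]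
  rw [PySem.Dict.get?_mk_cons, b3]
  simp only [Bool.false_eq_true, if_false]
  exact (PySem.Dict.get?_eq_none_iff_contains _ _).mpr rfl

-- two outputs that differ at a fixed index differ
theorem append_neq_of_getElem (x y : List Char) (i : Nat) (hx : i < x.length) (hy : i < y.length)
    (hne : x[i]? ≠ y[i]?) (z1 z2 : List Char) : x ++ z1 ≠ y ++ z2 := by
  intro heq
  apply hne
  rw [← List.getElem?_append_left hx (l₂ := z1), ← List.getElem?_append_left hy (l₂ := z2), heq]

theorem spR_front (T : List (List Char × List Char)) (k v w : List Char) (hkne : k ≠ [])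
    (hfind : T.find? (fun kv => kv.1.isPrefixOf (k ++ w)) = some (k, v)) :
    spR T (k ++ w) = v ++ spR T w := by
  cases hkc : k with
  | nil => exact absurd hkc hkne
  | cons a b =>
      subst hkc
      rw [List.cons_append] at hfind ⊢
      exact spR_step T a (b ++ w) (a :: b) v w (by simp) hfind (by rw [List.cons_append])

-- at the front of a 'de' trigger occurrence the two programs provably disagree
theorem front_de (r : List Char) :
    seqR (tbl dDe) ("explainntropy".toList ++ r) ≠ spR (tbl dDe) ("explainntropy".toList ++ r) := by
  have hA : seqR (tbl dDe) ("explainntropy".toList ++ r)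
      = "ErklärEntropie".toList ++ rep "quantum".toList "Quanten".toList (rep "entropy".toList "Entropie".toList (rep "gravity".toList "Gravitation".toList (rep "how does".toList "Wie funktioniert".toList (rep "explain".toList "Erkläre".toList (rep "what is".toList "Was ist".toList r))))) := by
    show rep "quantum".toList "Quanten".toList (rep "entropy".toList "Entropie".toList (rep "gravity".toList "Gravitation".toList (rep "how does".toList "Wie funktioniert".toList (rep "explain".toList "Erkläre".toList (rep "what is".toList "Was ist".toList ("explainntropy".toList ++ r)))))) = _
    rw [rep_over "what is".toList "Was ist".toList "explainntropy".toList (by decide) r]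
    rw [show ("explainntropy".toList : List Char) = "explain".toList ++ "ntropy".toList from by decide,
        List.append_assoc, rep_front "explain".toList "Erkläre".toList (by decide),
        rep_over "explain".toList "Erkläre".toList "ntropy".toList (by decide),
        ← List.append_assoc,
        show ("Erkläre".toList ++ "ntropy".toList : List Char) = "Erklärentropy".toList from by decide]
    rw [rep_over "how does".toList "Wie funktioniert".toList "Erklärentropy".toList (by decide),
        rep_over "gravity".toList "Gravitation".toList "Erklärentropy".toList (by decide)]
    rw [show ("Erklärentropy".toList : List Char) = "Erklär".toList ++ "entropy".toList from by decide,
        List.append_assoc, rep_over "entropy".toList "Entropie".toList "Erklär".toList (by decide),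
        rep_front "entropy".toList "Entropie".toList (by decide),
        ← List.append_assoc,
        show ("Erklär".toList ++ "Entropie".toList : List Char) = "ErklärEntropie".toList from by decide]
    rw [rep_over "quantum".toList "Quanten".toList "ErklärEntropie".toList (by decide)]
  have hB : spR (tbl dDe) ("explainntropy".toList ++ r)
      = "Erklärentropy".toList ++ spR (tbl dDe) r := by
    rw [show ("explainntropy".toList : List Char) = "explain".toList ++ "ntropy".toList from by decide,
        List.append_assoc,
        spR_front (tbl dDe) "explain".toList "Erkläre".toList ("ntropy".toList ++ r) (by decide) (by rfl),
        spR_over (tbl dDe) "ntropy".toList (by decide) r,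
        ← List.append_assoc,
        show ("Erkläre".toList ++ "ntropy".toList : List Char) = "Erklärentropy".toList from by decide]
  rw [hA, hB]
  exact append_neq_of_getElem _ _ 6 (by decide) (by decide) (by decide) _ _

-- the three 'fr' trigger fronts
theorem front_fr1 (r : List Char) :
    seqR (tbl dFr) ("what isxplain".toList ++ r) ≠ spR (tbl dFr) ("what isxplain".toList ++ r) := by
  have hA : seqR (tbl dFr) ("what isxplain".toList ++ r)
      = "Qu'est-ce quExpliquez".toList ++ rep "quantum".toList "quantique".toList (rep "entropy".toList "entropie".toList (rep "gravity".toList "gravité".toList (rep "how does".toList "Comment fonctionne".toList (rep "explain".toList "Expliquez".toList (rep "what is".toList "Qu'est-ce que".toList r))))) := by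
    show rep "quantum".toList "quantique".toList (rep "entropy".toList "entropie".toList (rep "gravity".toList "gravité".toList (rep "how does".toList "Comment fonctionne".toList (rep "explain".toList "Expliquez".toList (rep "what is".toList "Qu'est-ce que".toList ("what isxplain".toList ++ r)))))) = _
    rw [show ("what isxplain".toList : List Char) = "what is".toList ++ "xplain".toList from by decide,
        List.append_assoc, rep_front "what is".toList "Qu'est-ce que".toList (by decide),
        rep_over "what is".toList "Qu'est-ce que".toList "xplain".toList (by decide),
        ← List.append_assoc,
        show ("Qu'est-ce que".toList ++ "xplain".toList : List Char) = "Qu'est-ce quexplain".toList from by decide]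
    rw [show ("Qu'est-ce quexplain".toList : List Char) = "Qu'est-ce qu".toList ++ "explain".toList from by decide,
        List.append_assoc, rep_over "explain".toList "Expliquez".toList "Qu'est-ce qu".toList (by decide),
        rep_front "explain".toList "Expliquez".toList (by decide),
        ← List.append_assoc,
        show ("Qu'est-ce qu".toList ++ "Expliquez".toList : List Char) = "Qu'est-ce quExpliquez".toList from by decide]
    rw [rep_over "how does".toList "Comment fonctionne".toList "Qu'est-ce quExpliquez".toList (by decide),
        rep_over "gravity".toList "gravité".toList "Qu'est-ce quExpliquez".toList (by decide),
        rep_over "entropy".toList "entropie".toList "Qu'est-ce quExpliquez".toList (by decide),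
        rep_over "quantum".toList "quantique".toList "Qu'est-ce quExpliquez".toList (by decide)]
  have hB : spR (tbl dFr) ("what isxplain".toList ++ r)
      = "Qu'est-ce quexplain".toList ++ spR (tbl dFr) r := by
    rw [show ("what isxplain".toList : List Char) = "what is".toList ++ "xplain".toList from by decide,
        List.append_assoc,
        spR_front (tbl dFr) "what is".toList "Qu'est-ce que".toList ("xplain".toList ++ r) (by decide) (by rfl),
        spR_over (tbl dFr) "xplain".toList (by decide) r,
        ← List.append_assoc,
        show ("Qu'est-ce que".toList ++ "xplain".toList : List Char) = "Qu'est-ce quexplain".toList from by decide]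
  rw [hA, hB]
  exact append_neq_of_getElem _ _ 12 (by decide) (by decide) (by decide) _ _

theorem front_fr2 (r : List Char) :
    seqR (tbl dFr) ("what isntropy".toList ++ r) ≠ spR (tbl dFr) ("what isntropy".toList ++ r) := by
  have hA : seqR (tbl dFr) ("what isntropy".toList ++ r)
      = "Qu'est-ce quentropie".toList ++ rep "quantum".toList "quantique".toList (rep "entropy".toList "entropie".toList (rep "gravity".toList "gravité".toList (rep "how does".toList "Comment fonctionne".toList (rep "explain".toList "Expliquez".toList (rep "what is".toList "Qu'est-ce que".toList r))))) := by
    show rep "quantum".toList "quantique".toList (rep "entropy".toList "entropie".toList (rep "gravity".toList "gravité".toList (rep "how does".toList "Comment fonctionne".toList (rep "explain".toList "Expliquez".toList (rep "what is".toList "Qu'est-ce que".toList ("what isntropy".toList ++ r)))))) = _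
    rw [show ("what isntropy".toList : List Char) = "what is".toList ++ "ntropy".toList from by decide,
        List.append_assoc, rep_front "what is".toList "Qu'est-ce que".toList (by decide),
        rep_over "what is".toList "Qu'est-ce que".toList "ntropy".toList (by decide),
        ← List.append_assoc,
        show ("Qu'est-ce que".toList ++ "ntropy".toList : List Char) = "Qu'est-ce quentropy".toList from by decide]
    rw [rep_over "explain".toList "Expliquez".toList "Qu'est-ce quentropy".toList (by decide),
        rep_over "how does".toList "Comment fonctionne".toList "Qu'est-ce quentropy".toList (by decide),
        rep_over "gravity".toList "gravité".toList "Qu'est-ce quentropy".toList (by decide)]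
    rw [show ("Qu'est-ce quentropy".toList : List Char) = "Qu'est-ce qu".toList ++ "entropy".toList from by decide,
        List.append_assoc, rep_over "entropy".toList "entropie".toList "Qu'est-ce qu".toList (by decide),
        rep_front "entropy".toList "entropie".toList (by decide),
        ← List.append_assoc,
        show ("Qu'est-ce qu".toList ++ "entropie".toList : List Char) = "Qu'est-ce quentropie".toList from by decide]
    rw [rep_over "quantum".toList "quantique".toList "Qu'est-ce quentropie".toList (by decide)]
  have hB : spR (tbl dFr) ("what isntropy".toList ++ r)
      = "Qu'est-ce quentropy".toList ++ spR (tbl dFr) r := by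
    rw [show ("what isntropy".toList : List Char) = "what is".toList ++ "ntropy".toList from by decide,
        List.append_assoc,
        spR_front (tbl dFr) "what is".toList "Qu'est-ce que".toList ("ntropy".toList ++ r) (by decide) (by rfl),
        spR_over (tbl dFr) "ntropy".toList (by decide) r,
        ← List.append_assoc,
        show ("Qu'est-ce que".toList ++ "ntropy".toList : List Char) = "Qu'est-ce quentropy".toList from by decide]
  rw [hA, hB]
  exact append_neq_of_getElem _ _ 18 (by decide) (by decide) (by decide) _ _

theorem front_fr3 (r : List Char) :
    seqR (tbl dFr) ("how doesntropy".toList ++ r) ≠ spR (tbl dFr) ("how doesntropy".toList ++ r) := by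
  have hA : seqR (tbl dFr) ("how doesntropy".toList ++ r)
      = "Comment fonctionnentropie".toList ++ rep "quantum".toList "quantique".toList (rep "entropy".toList "entropie".toList (rep "gravity".toList "gravité".toList (rep "how does".toList "Comment fonctionne".toList (rep "explain".toList "Expliquez".toList (rep "what is".toList "Qu'est-ce que".toList r))))) := by
    show rep "quantum".toList "quantique".toList (rep "entropy".toList "entropie".toList (rep "gravity".toList "gravité".toList (rep "how does".toList "Comment fonctionne".toList (rep "explain".toList "Expliquez".toList (rep "what is".toList "Qu'est-ce que".toList ("how doesntropy".toList ++ r)))))) = _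
    rw [rep_over "what is".toList "Qu'est-ce que".toList "how doesntropy".toList (by decide) r,
        rep_over "explain".toList "Expliquez".toList "how doesntropy".toList (by decide)]
    rw [show ("how doesntropy".toList : List Char) = "how does".toList ++ "ntropy".toList from by decide,
        List.append_assoc, rep_front "how does".toList "Comment fonctionne".toList (by decide),
        rep_over "how does".toList "Comment fonctionne".toList "ntropy".toList (by decide),
        ← List.append_assoc,
        show ("Comment fonctionne".toList ++ "ntropy".toList : List Char) = "Comment fonctionnentropy".toList from by decide]
    rw [rep_over "gravity".toList "gravité".toList "Comment fonctionnentropy".toList (by decide)]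
    rw [show ("Comment fonctionnentropy".toList : List Char) = "Comment fonctionn".toList ++ "entropy".toList from by decide,
        List.append_assoc, rep_over "entropy".toList "entropie".toList "Comment fonctionn".toList (by decide),
        rep_front "entropy".toList "entropie".toList (by decide),
        ← List.append_assoc,
        show ("Comment fonctionn".toList ++ "entropie".toList : List Char) = "Comment fonctionnentropie".toList from by decide]
    rw [rep_over "quantum".toList "quantique".toList "Comment fonctionnentropie".toList (by decide)]
  have hB : spR (tbl dFr) ("how doesntropy".toList ++ r)
      = "Comment fonctionnentropy".toList ++ spR (tbl dFr) r := by
    rw [show ("how doesntropy".toList : List Char) = "how does".toList ++ "ntropy".toList from by decide,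
        List.append_assoc,
        spR_front (tbl dFr) "how does".toList "Comment fonctionne".toList ("ntropy".toList ++ r) (by decide) (by rfl),
        spR_over (tbl dFr) "ntropy".toList (by decide) r,
        ← List.append_assoc,
        show ("Comment fonctionne".toList ++ "ntropy".toList : List Char) = "Comment fonctionnentropy".toList from by decide]
  rw [hA, hB]
  exact append_neq_of_getElem _ _ 23 (by decide) (by decide) (by decide) _ _

theorem neq_de (s : List Char) (h : "explainntropy".toList <:+: s) :
    seqR (tbl dDe) s ≠ spR (tbl dDe) s := by
  refine main_neq (tbl dDe) XSkeys TrigsDe (by decide) (by decide) (by decide) (by decide)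
    (by decide) (by decide) (by decide) (by decide) ?_ ?_ s.length s (le_refl _)
    ⟨"explainntropy".toList, by simp [TrigsDe], h⟩
  · intro u hu
    simp only [TrigsDe, List.mem_cons, List.not_mem_nil, or_false] at hu
    subst hu
    exact ⟨("explain".toList, "Erkläre".toList), by decide, by decide⟩
  · intro u hu r
    simp only [TrigsDe, List.mem_cons, List.not_mem_nil, or_false] at hu
    subst hu
    exact front_de r

theorem neq_fr (s : List Char) (h : ∃ u ∈ TrigsFr, u <:+: s) :
    seqR (tbl dFr) s ≠ spR (tbl dFr) s := by
  refine main_neq (tbl dFr) XSkeys TrigsFr (by decide) (by decide) (by decide) (by decide)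
    (by decide) (by decide) (by decide) (by decide) ?_ ?_ s.length s (le_refl _) h
  · intro u hu
    simp only [TrigsFr, List.mem_cons, List.not_mem_nil, or_false] at hu
    rcases hu with rfl | rfl | rfl
    · exact ⟨("what is".toList, "Qu'est-ce que".toList), by decide, by decide⟩
    · exact ⟨("what is".toList, "Qu'est-ce que".toList), by decide, by decide⟩
    · exact ⟨("how does".toList, "Comment fonctionne".toList), by decide, by decide⟩
  · intro u hu r
    simp only [TrigsFr, List.mem_cons, List.not_mem_nil, or_false] at hu
    rcases hu with rfl | rfl | rfl
    · exact front_fr1 r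
    · exact front_fr2 r
    · exact front_fr3 r

-- ===== VERDICT (by name: the statement is the Claim_ definition above) =====
theorem translate_prompt_spec : Claim_unchanged_translate_prompt := by
  intro prompt lang _ hD
  show translate_prompt prompt lang = translate_prompt_alt prompt lang
  by_cases h1 : lang = "de"
  · subst h1
    have htf : ∀ u ∈ TrigsDe, ¬ u <:+: (PySem.Str.lower prompt).toList := by
      intro u hu hinf
      simp only [TrigsDe, List.mem_cons, List.not_mem_nil, or_false] at hu
      subst hu
      exact hD (Or.inl ⟨rfl, (PySem.Str.isIn_iff_infix _ _).mpr hinf⟩)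
    unfold translate_prompt
    rw [getA_de, altB_eq "de" dDe 0 (by decide) rowsCol_de prompt]
    exact assemble dDe TrigsDe prompt main_de htf (by decide)
  · by_cases h2 : lang = "fr"
    · subst h2
      have htf : ∀ u ∈ TrigsFr, ¬ u <:+: (PySem.Str.lower prompt).toList := by
        intro u hu hinf
        simp only [TrigsFr, List.mem_cons, List.not_mem_nil, or_false] at hu
        rcases hu with rfl | rfl | rfl
        · exact hD (Or.inr ⟨rfl, Or.inl ((PySem.Str.isIn_iff_infix _ _).mpr hinf)⟩)
        · exact hD (Or.inr ⟨rfl, Or.inr (Or.inl ((PySem.Str.isIn_iff_infix _ _).mpr hinf))⟩)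
        · exact hD (Or.inr ⟨rfl, Or.inr (Or.inr ((PySem.Str.isIn_iff_infix _ _).mpr hinf))⟩)
      unfold translate_prompt
      rw [getA_fr, altB_eq "fr" dFr 1 (by decide) rowsCol_fr prompt]
      exact assemble dFr TrigsFr prompt main_fr htf (by decide)
    · by_cases h3 : lang = "es"
      · subst h3
        unfold translate_prompt
        rw [getA_es, altB_eq "es" dEs 2 (by decide) rowsCol_es prompt]
        exact assemble dEs TrigsEs prompt main_es (by simp [TrigsEs]) (by decide)
      · unfold translate_prompt
        rw [getA_none lang h1 h2 h3, altB_none lang h1 h2 h3 prompt]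

theorem translate_prompt_changed : Claim_changed_translate_prompt := by
  unfold Claim_changed_translate_prompt; decide

theorem translate_prompt_tight : Claim_exact_translate_prompt := by
  intro prompt lang _ hD heq
  rcases hD with ⟨hl, hin⟩ | ⟨hl, hin⟩
  · subst hl
    rw [altB_eq "de" dDe 0 (by decide) rowsCol_de prompt] at heq
    have hts := congrArg String.toList heq
    have hts' : ((PySem.Dict.items dDe).foldl (fun a kv => PySem.Str.replace a kv.1 kv.2) (PySem.Str.lower prompt)).toList
        = (String.ofList (spGo (tbl dDe) (PySem.Str.lower prompt).toList.length (PySem.Str.lower prompt).toList)).toList := by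
      unfold translate_prompt at hts
      rw [getA_de] at hts
      exact hts
    rw [portA_toList dDe (by decide) prompt, portB_toList dDe prompt] at hts'
    exact neq_de _ ((PySem.Str.isIn_iff_infix _ _).mp hin) hts'
  · subst hl
    rw [altB_eq "fr" dFr 1 (by decide) rowsCol_fr prompt] at heq
    have hts := congrArg String.toList heq
    have hts' : ((PySem.Dict.items dFr).foldl (fun a kv => PySem.Str.replace a kv.1 kv.2) (PySem.Str.lower prompt)).toList
        = (String.ofList (spGo (tbl dFr) (PySem.Str.lower prompt).toList.length (PySem.Str.lower prompt).toList)).toList := by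
      unfold translate_prompt at hts
      rw [getA_fr] at hts
      exact hts
    rw [portA_toList dFr (by decide) prompt, portB_toList dFr prompt] at hts'
    refine neq_fr _ ?_ hts'
    rcases hin with h | h | h
    · exact ⟨"what isxplain".toList, by simp [TrigsFr], (PySem.Str.isIn_iff_infix _ _).mp h⟩
    · exact ⟨"what isntropy".toList, by simp [TrigsFr], (PySem.Str.isIn_iff_infix _ _).mp h⟩
    · exact ⟨"how doesntropy".toList, by simp [TrigsFr], (PySem.Str.isIn_iff_infix _ _).mp h⟩
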